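-- pv_equiv track=rewrite | github.com/hberens/encryption_algorithms | aes_kak.py | _affine_inverse
-- ===== SOURCE A (Python) =====
-- def _gf_mul(a: int, b: int) -> int:
--   # classic shift-and-add multiply in gf(2^8)
--   p = 0
--   for _ in range(8):
--     if b & 1:
--       p ^= a
--     hi = a & 0x80
--     a = (a << 1) & 0xFF
--     if hi:
--       a ^= 0x1B
--     b >>= 1
--   return p
--
-- def _gf_inv(a: int) -> int:
--   if a == 0:
--     return 0
--   # inverse in GF(2^8) mod x^8+x^4+x^3+x+1 via a^(254)
--   p, r = 1, a
--   e = 254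
--   while e:
--     if e & 1:
--       p = _gf_mul(p, r)
--     r = _gf_mul(r, r)
--     e >>= 1
--   return p
--
-- def _affine_inverse(x: int) -> int:
--   """Inverse affine (decryption S-box), then MI (Kak §8.5.2)."""
--   z = 0
--   for i in range(8):
--     bi = (x >> i) & 1
--     t = bi
--     t ^= (x >> ((i + 2) % 8)) & 1
--     t ^= (x >> ((i + 5) % 8)) & 1
--     t ^= (x >> ((i + 7) % 8)) & 1
--     t ^= (0x05 >> i) & 1
--     z |= t << i
--   if z == 0:
--     return 0
--   return _gf_inv(z)
-- ===== SOURCE B (Python) =====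
-- def _gf_mul(a: int, b: int) -> int:
--   p = 0
--   for _ in range(8):
--     if b & 1:
--       p ^= a
--     hi = a & 0x80
--     a = (a << 1) & 0xFF
--     if hi:
--       a ^= 0x1B
--     b >>= 1
--   return p
--
-- def _gf_inv(a: int) -> int:
--   if a == 0:
--     return 0
--   p, r = 1, a
--   e = 254
--   while e:
--     if e & 1:
--       p = _gf_mul(p, r)
--     r = _gf_mul(r, r)
--     e >>= 1
--   return p
--
-- def _ror8(v: int, k: int) -> int:
--   # rotate an 8-bit value right by k
--   return ((v >> k) | (v << (8 - k))) & 0xFF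
--
-- def _affine_inverse(x: int) -> int:
--   """Inverse affine (decryption S-box) as a word-level rotate-XOR, then MI."""
--   y = x & 0xFF
--   z = y ^ _ror8(y, 2) ^ _ror8(y, 5) ^ _ror8(y, 7) ^ 0x05
--   return _gf_inv(z)
-- ===== Notes on version B (the rewrite author's own statement) =====
-- stated objective: idiomatic
-- what changed: Replaced the per-bit loop (8 iterations assembling z bit by bit with modular index arithmetic) by a word-level closed form z = y ^ ror(y,2) ^ ror(y,5) ^ ror(y,7) ^ 0x05 on the masked byte, dropping A's redundant zero-check before _gf_inv, which already covers that case.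
import Mathlib
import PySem

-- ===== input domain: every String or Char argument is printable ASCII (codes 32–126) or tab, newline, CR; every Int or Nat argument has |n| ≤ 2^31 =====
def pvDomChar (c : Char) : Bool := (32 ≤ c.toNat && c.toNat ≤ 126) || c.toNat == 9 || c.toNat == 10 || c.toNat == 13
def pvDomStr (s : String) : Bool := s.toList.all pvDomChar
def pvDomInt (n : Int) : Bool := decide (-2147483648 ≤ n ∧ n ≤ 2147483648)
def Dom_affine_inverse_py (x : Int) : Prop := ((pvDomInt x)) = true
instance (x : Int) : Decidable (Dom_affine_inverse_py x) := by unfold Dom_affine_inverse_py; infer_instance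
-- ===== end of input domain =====

-- B replaces A's per-bit affine loop with the word-level rotate-XOR closed form
-- z = y ^ ror(y,2) ^ ror(y,5) ^ ror(y,7) ^ 0x05 on the masked byte (and drops the
-- redundant zero-check before the GF inverse, which already covers that case); objective: idiomatic, same cost.


-- ===== PORT A =====
-- _gf_mul: shift-and-add multiply in GF(2^8); the 8-iteration for loop is a foldl
-- over the state (p, a, b).  Python truthiness 'if b & 1:' / 'if hi:' is '≠ 0'.
def pvGfMul (a b : Int) : Int :=
  ((List.range 8).foldl (fun (s : Int × Int × Int) (_ : Nat) =>
    let p := if PySem.Int.band s.2.2 1 ≠ 0 then PySem.Int.bxor s.1 s.2.1 else s.1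
    let hi := PySem.Int.band s.2.1 128
    let a1 := PySem.Int.band (s.2.1 <<< (1 : Nat)) 255
    let a2 := if hi ≠ 0 then PySem.Int.bxor a1 27 else a1
    (p, a2, s.2.2 >>> (1 : Nat))) ((0 : Int), a, b)).1

-- _gf_inv's 'while e:' loop; e starts at the nonnegative literal 254 so it is
-- tracked as a Nat ('e & 1' = e % 2, 'e >>= 1' = e / 2); the fuel parameter only
-- makes the recursion structural (fuel 8 suffices for e = 254, it never runs out).
def pvGfInvLoop : Nat → Nat → Int → Int → Int
  | 0, _, p, _ => p
  | fuel + 1, e, p, r =>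
    if e = 0 then p
    else pvGfInvLoop fuel (e / 2) (if e % 2 = 1 then pvGfMul p r else p) (pvGfMul r r)

def pvGfInv (a : Int) : Int :=
  if a = 0 then 0 else pvGfInvLoop 8 254 1 a

-- _affine_inverse's per-bit loop building z; t's successive ^= steps are the nested bxors
def pvAffineZ (x : Int) : Int :=
  (List.range 8).foldl (fun (z : Int) (i : Nat) =>
      PySem.Int.bor z
        ((PySem.Int.bxor (PySem.Int.bxor (PySem.Int.bxor (PySem.Int.bxor
            (PySem.Int.band (x >>> i) 1)
            (PySem.Int.band (x >>> ((i + 2) % 8)) 1))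
            (PySem.Int.band (x >>> ((i + 5) % 8)) 1))
            (PySem.Int.band (x >>> ((i + 7) % 8)) 1))
            (PySem.Int.band ((5 : Int) >>> i) 1)) <<< i)) 0

def affine_inverse_py (x : Int) : Int :=
  let z := pvAffineZ x
  if z = 0 then 0 else pvGfInv z

-- ===== PORT B =====
-- _ror8: rotate an 8-bit value right by k
def pvRor8 (v : Int) (k : Nat) : Int :=
  PySem.Int.band (PySem.Int.bor (v >>> k) (v <<< (8 - k))) 255

def pvAltZ (y : Int) : Int :=
  PySem.Int.bxor (PySem.Int.bxor (PySem.Int.bxor (PySem.Int.bxor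
    y (pvRor8 y 2)) (pvRor8 y 5)) (pvRor8 y 7)) 5

def affine_inverse_py_alt (x : Int) : Int :=
  let y := PySem.Int.band x 255
  let z := pvAltZ y
  pvGfInv z

-- ===== PRECONDITION & SPEC =====
def Spec_affine_inverse_py (x : Int) (out : Int) : Prop := out = affine_inverse_py_alt x
instance (x : Int) (out : Int) : Decidable (Spec_affine_inverse_py x out) := by unfold Spec_affine_inverse_py; infer_instance

-- ===== CLAIM (what is proved, stated in full; the proofs are below) =====
def Claim_equal_affine_inverse_py : Prop := ∀ (x : Int), Dom_affine_inverse_py x → Spec_affine_inverse_py x (affine_inverse_py x)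

-- ===== LEMMAS AND PROOFS =====

-- bit i (i < 8) of x equals bit i of x % 256
lemma pv_bit_mod (x : Int) (i : Nat) (h : i < 8) :
    PySem.Int.band (x >>> i) 1 = PySem.Int.band ((x % 256) >>> i) 1 := by
  rw [PySem.Int.band_one, PySem.Int.band_one,
      PySem.Int.mod_eq_emod_of_pos (by norm_num), PySem.Int.mod_eq_emod_of_pos (by norm_num),
      Int.shiftRight_eq_div_pow, Int.shiftRight_eq_div_pow]
  push_cast
  interval_cases i <;> norm_num <;> omega

-- x & 255 = x % 256 (Python bitwise-and semantics, any sign of x)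
lemma pv_mask255 (x : Int) : PySem.Int.band x 255 = x % 256 := by
  have hp : ∀ m : Nat, m &&& 255 = m % 256 := fun m => by
    have := Nat.and_two_pow_sub_one_eq_mod m 8
    norm_num at this; exact this
  have hn : ∀ m : Nat, 255 &&& m = m % 256 := fun m => by
    rw [Nat.and_comm]; exact hp m
  simp only [PySem.Int.band, show Int.toNat 255 = 255 from rfl]
  split_ifs with h1 h2 h2
  · rw [hp]; omega
  · norm_num at h2
  · rw [hn]; omega
  · norm_num at h2

-- A's z depends only on the low byte of x
lemma pv_Az_mod (x : Int) : pvAffineZ x = pvAffineZ (x % 256) := by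
  unfold pvAffineZ
  rw [PySem.List.foldl_congr_mem (List.range 8) _ _ 0 ?_]
  intro acc i hi
  have h1 : i < 8 := List.mem_range.mp hi
  rw [pv_bit_mod x i h1,
      pv_bit_mod x ((i + 2) % 8) (Nat.mod_lt _ (by norm_num)),
      pv_bit_mod x ((i + 5) % 8) (Nat.mod_lt _ (by norm_num)),
      pv_bit_mod x ((i + 7) % 8) (Nat.mod_lt _ (by norm_num))]

-- on bytes, A's per-bit z equals B's rotate-XOR z
set_option maxRecDepth 20000 in
set_option maxHeartbeats 2000000 in
lemma pv_z_eq : ∀ n : Nat, n < 256 → pvAffineZ (n : Int) = pvAltZ (n : Int) := by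
  decide

-- ===== VERDICT (by name: the statement is the Claim_ definition above) =====
theorem affine_inverse_py_spec : Claim_equal_affine_inverse_py := by
  intro x _
  unfold Spec_affine_inverse_py
  have hA : affine_inverse_py x = pvGfInv (pvAffineZ x) := by
    show (if pvAffineZ x = 0 then 0 else pvGfInv (pvAffineZ x)) = _
    by_cases h : pvAffineZ x = 0
    · rw [h]; simp [pvGfInv]
    · rw [if_neg h]
  have hB : affine_inverse_py_alt x = pvGfInv (pvAltZ (x % 256)) := by
    show pvGfInv (pvAltZ (PySem.Int.band x 255)) = _
    rw [pv_mask255]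
  have h0 : 0 ≤ x % 256 := Int.emod_nonneg x (by norm_num)
  have h1 : x % 256 < 256 := Int.emod_lt_of_pos x (by norm_num)
  have h2 := pv_z_eq (x % 256).toNat (by omega)
  rw [Int.toNat_of_nonneg h0] at h2
  rw [hA, hB, pv_Az_mod, h2]
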